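-- pv_equiv track=rewrite | github.com/fff01/TE- | scripts/clean_tekg2_standardized_jsonl.py | clean_named_entities
-- ===== SOURCE A (Python) =====
-- def norm(value) -> str:
--     return " ".join(str(value or "").split()).strip()
--
-- def norm_key(value: str) -> str:
--     return norm(value).casefold()
--
-- def clean_named_entities(items, keep_disease_class: bool = False):
--     cleaned = []
--     seen = {}
--     dropped_missing_name = 0
--     duplicates_merged = 0
--
--     for item in items or []:
--         name = norm(item.get("name", ""))
--         if not name:
--             dropped_missing_name += 1
--             continue
--
--         payload = {
--             "name": name,
--             "description": norm(item.get("description", "")),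
--         }
--         if keep_disease_class:
--             disease_class = norm(item.get("disease_class", ""))
--             if disease_class:
--                 payload["disease_class"] = disease_class
--
--         key = norm_key(name)
--         if key in seen:
--             duplicates_merged += 1
--             existing = cleaned[seen[key]]
--             if not existing.get("description") and payload.get("description"):
--                 existing["description"] = payload["description"]
--             if keep_disease_class and not existing.get("disease_class") and payload.get("disease_class"):
--                 existing["disease_class"] = payload["disease_class"]
--             continue
--
--         seen[key] = len(cleaned)
--         cleaned.append(payload)
--
--     return cleaned, dropped_missing_name, duplicates_merged
-- ===== SOURCE B (Python) =====
-- def norm(value) -> str: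
--     return " ".join(str(value or "").split()).strip()
--
-- def norm_key(value: str) -> str:
--     return norm(value).casefold()
--
-- def clean_named_entities(items, keep_disease_class: bool = False):
--     # Pass 1: group normalized records by name key, counting dropped empties.
--     dropped_missing_name = 0
--     groups = {}  # key -> (display name, [(description, disease_class), ...])
--     for item in items or []:
--         name = norm(item.get("name", ""))
--         if not name:
--             dropped_missing_name += 1
--             continue
--         desc = norm(item.get("description", ""))
--         dc = norm(item.get("disease_class", "")) if keep_disease_class else ""
--         key = norm_key(name)
--         if key in groups:
--             groups[key][1].append((desc, dc))
--         else:
--             groups[key] = (name, [(desc, dc)])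
--
--     # Pass 2: one payload per group; first non-empty field value wins.
--     cleaned = []
--     duplicates_merged = 0
--     for name, recs in groups.values():
--         duplicates_merged += len(recs) - 1
--         payload = {
--             "name": name,
--             "description": next((d for d, _ in recs if d), ""),
--         }
--         if keep_disease_class:
--             dc = next((c for _, c in recs if c), "")
--             if dc:
--                 payload["disease_class"] = dc
--         cleaned.append(payload)
--     return cleaned, dropped_missing_name, duplicates_merged
-- ===== Notes on version B (the rewrite author's own statement) =====
-- stated objective: alternative
-- what changed: A's single pass keeps a dict of indexes into the output and back-patches cleaned[seen[key]] in place at every duplicate; B is a two-pass group-then-reduce: pass 1 groups the normalized records per name key in insertion order, pass 2 emits one payload per group taking the first non-empty description/disease_class and counts duplicates as group size minus one.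
import Mathlib
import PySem

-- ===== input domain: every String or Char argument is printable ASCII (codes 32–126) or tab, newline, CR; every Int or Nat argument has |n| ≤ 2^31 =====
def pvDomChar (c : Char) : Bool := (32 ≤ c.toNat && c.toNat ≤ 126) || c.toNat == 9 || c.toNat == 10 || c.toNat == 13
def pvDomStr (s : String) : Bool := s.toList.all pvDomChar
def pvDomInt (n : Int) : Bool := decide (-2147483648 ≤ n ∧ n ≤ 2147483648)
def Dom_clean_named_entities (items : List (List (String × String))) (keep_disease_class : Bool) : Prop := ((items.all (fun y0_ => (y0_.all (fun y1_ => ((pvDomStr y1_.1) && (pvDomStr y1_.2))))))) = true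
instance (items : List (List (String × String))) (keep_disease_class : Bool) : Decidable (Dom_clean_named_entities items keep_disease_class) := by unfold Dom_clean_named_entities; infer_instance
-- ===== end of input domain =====

-- B replaces A's single pass (dict of indexes + in-place back-patching of cleaned) by a
-- group-then-reduce decomposition: pass 1 groups normalized records by name key, pass 2
-- emits one payload per group taking the first non-empty field value; objective: alternative.

-- ===== PORT A =====
-- shared module helpers norm / norm_key (casefold ported as lower: exact on the ASCII domain)
def pvNorm (s : String) : String :=
  PySem.Str.strip (PySem.Str.join " " (PySem.Str.split₀ s))

def pvNormKey (s : String) : String := PySem.Str.lower (pvNorm s)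

-- item.get(k, "") (the dict argument as an assoc list; duplicate keys: last wins, like dict(pairs))
def pvGet (item : List (String × String)) (k : String) : String :=
  (PySem.Dict.ofList item).getD k ""

-- one iteration of A's loop; state = (cleaned, seen, dropped_missing_name, duplicates_merged)
def pvStepA (keep : Bool)
    (st : List (PySem.Dict String String) × PySem.Dict String Int × Int × Int)
    (item : List (String × String)) :
    List (PySem.Dict String String) × PySem.Dict String Int × Int × Int :=
  let (cleaned, seen, dropped, dups) := st
  let name := pvNorm (pvGet item "name")
  if name = "" then (cleaned, seen, dropped + 1, dups)
  else
    let payload := (PySem.Dict.empty.insert "name" name).insert "description"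
        (pvNorm (pvGet item "description"))
    let payload := if keep then
        (let dc := pvNorm (pvGet item "disease_class")
         if dc ≠ "" then payload.insert "disease_class" dc else payload)
      else payload
    let key := pvNormKey name
    if seen.contains key then
      -- cleaned[seen[key]]: the stored index is always ≥ 0 and < cleaned.length (loop invariant)
      let i := (seen.getD key 0).toNat
      let existing := cleaned.getD i PySem.Dict.empty
      let e1 := if existing.getD "description" "" = "" ∧ payload.getD "description" "" ≠ "" then
          existing.insert "description" (payload.getD "description" "") else existing
      let e2 := if keep = true ∧ e1.getD "disease_class" "" = "" ∧ payload.getD "disease_class" "" ≠ "" then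
          e1.insert "disease_class" (payload.getD "disease_class" "") else e1
      (cleaned.set i e2, seen, dropped, dups + 1)
    else
      (cleaned ++ [payload], seen.insert key (cleaned.length : Int), dropped, dups)

def clean_named_entities (items : List (List (String × String))) (keep_disease_class : Bool) :
    (List (List (String × String))) × Int × Int :=
  let st := items.foldl (pvStepA keep_disease_class) ([], PySem.Dict.empty, 0, 0)
  (st.1.map (fun d => d.items), st.2.2.1, st.2.2.2)

-- ===== PORT B =====
-- pass 1 of B: group the normalized records by key; state = (groups, dropped_missing_name)
def pvStepB (keep : Bool)
    (st : PySem.Dict String (String × List (String × String)) × Int)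
    (item : List (String × String)) :
    PySem.Dict String (String × List (String × String)) × Int :=
  let (groups, dropped) := st
  let name := pvNorm (pvGet item "name")
  if name = "" then (groups, dropped + 1)
  else
    let desc := pvNorm (pvGet item "description")
    let dc := if keep then pvNorm (pvGet item "disease_class") else ""
    let key := pvNormKey name
    if groups.contains key then
      (groups.modify key ("", []) (fun g => (g.1, g.2 ++ [(desc, dc)])), dropped)
    else
      (groups.insert key (name, [(desc, dc)]), dropped)

-- one payload per group: first non-empty description / disease_class wins
def pvFinalize (keep : Bool) (name : String) (recs : List (String × String)) :
    PySem.Dict String String :=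
  let payload := (PySem.Dict.empty.insert "name" name).insert "description"
      (((recs.find? (fun r => r.1 != "")).map (·.1)).getD "")
  if keep then
    let dc := ((recs.find? (fun r => r.2 != "")).map (·.2)).getD ""
    if dc ≠ "" then payload.insert "disease_class" dc else payload
  else payload

-- pass 2 of B: state = (cleaned, duplicates_merged)
def pvStepB2 (keep : Bool) (acc : List (List (String × String)) × Int)
    (g : String × List (String × String)) : List (List (String × String)) × Int :=
  (acc.1 ++ [(pvFinalize keep g.1 g.2).items], acc.2 + ((g.2.length : Int) - 1))

def clean_named_entities_alt (items : List (List (String × String))) (keep_disease_class : Bool) :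
    (List (List (String × String))) × Int × Int :=
  let st := items.foldl (pvStepB keep_disease_class) (PySem.Dict.empty, 0)
  let fin := st.1.values.foldl (pvStepB2 keep_disease_class) ([], 0)
  (fin.1, st.2, fin.2)

-- ===== PRECONDITION & SPEC =====
def Spec_clean_named_entities (items : List (List (String × String))) (keep_disease_class : Bool) (out : (List (List (String × String))) × Int × Int) : Prop := out = clean_named_entities_alt items keep_disease_class
instance (items : List (List (String × String))) (keep_disease_class : Bool) (out : (List (List (String × String))) × Int × Int) : Decidable (Spec_clean_named_entities items keep_disease_class out) := by unfold Spec_clean_named_entities; infer_instance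

-- ===== CLAIM (what is proved, stated in full; the proofs are below) =====
def Claim_equal_clean_named_entities : Prop := ∀ (items : List (List (String × String))) (keep_disease_class : Bool), Dom_clean_named_entities items keep_disease_class → Spec_clean_named_entities items keep_disease_class (clean_named_entities items keep_disease_class)

-- ===== LEMMAS AND PROOFS =====

-- the two payload shapes that ever occur in cleaned
def pvP2 (n d : String) : PySem.Dict String String :=
  (PySem.Dict.empty.insert "name" n).insert "description" d
def pvP3 (n d c : String) : PySem.Dict String String :=
  (pvP2 n d).insert "disease_class" c

def pvD (recs : List (String × String)) : String := ((recs.find? (fun r => r.1 != "")).map (·.1)).getD ""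
def pvC (recs : List (String × String)) : String := ((recs.find? (fun r => r.2 != "")).map (·.2)).getD ""

theorem pvFinalize_shape (keep : Bool) (n : String) (rs : List (String × String)) :
    pvFinalize keep n rs =
      if keep = true then (if pvC rs ≠ "" then pvP3 n (pvD rs) (pvC rs) else pvP2 n (pvD rs))
      else pvP2 n (pvD rs) := rfl

theorem pvP2_getD_desc (n d : String) : (pvP2 n d).getD "description" "" = d := by
  simp [pvP2, PySem.Dict.getD_insert_self]
theorem pvP3_getD_desc (n d c : String) : (pvP3 n d c).getD "description" "" = d := by
  simp [pvP3, pvP2, PySem.Dict.getD_insert]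
theorem pvP2_getD_dc (n d : String) : (pvP2 n d).getD "disease_class" "" = "" := by
  simp [pvP2, PySem.Dict.getD_insert, PySem.Dict.getD_empty]
theorem pvP3_getD_dc (n d c : String) : (pvP3 n d c).getD "disease_class" "" = c := by
  simp [pvP3, PySem.Dict.getD_insert_self]
theorem pvP2_insert_desc (n d d' : String) : (pvP2 n d).insert "description" d' = pvP2 n d' := by
  simp [pvP2, PySem.Dict.insert_insert_self]
theorem pvP3_insert_desc (n d c d' : String) : (pvP3 n d c).insert "description" d' = pvP3 n d' c := by
  apply PySem.Dict.ext
  simp [pvP3, pvP2, PySem.Dict.items_insert, PySem.Dict.contains_insert, PySem.Dict.empty]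
theorem pvP2_insert_dc (n d c : String) : (pvP2 n d).insert "disease_class" c = pvP3 n d c := rfl

theorem pvD_eq_empty_iff (rs : List (String × String)) :
    pvD rs = "" ↔ rs.find? (fun r => r.1 != "") = none := by
  constructor
  · intro h
    cases hf : rs.find? (fun r => r.1 != "") with
    | none => rfl
    | some r =>
      have := List.find?_some hf
      simp only [bne_iff_ne, ne_eq] at this
      simp [pvD, hf] at h
      exact absurd h this
  · intro h; simp [pvD, h]
theorem pvC_eq_empty_iff (rs : List (String × String)) :
    pvC rs = "" ↔ rs.find? (fun r => r.2 != "") = none := by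
  constructor
  · intro h
    cases hf : rs.find? (fun r => r.2 != "") with
    | none => rfl
    | some r =>
      have := List.find?_some hf
      simp only [bne_iff_ne, ne_eq] at this
      simp [pvC, hf] at h
      exact absurd h this
  · intro h; simp [pvC, h]

-- A's in-place fill equals B's group merge extended by one record
theorem pvFill_eq (keep : Bool) (n : String) (rs : List (String × String)) (d c : String) :
    (let E := pvFinalize keep n rs
     let E1 := if E.getD "description" "" = "" ∧ d ≠ "" then E.insert "description" d else E
     if keep = true ∧ E1.getD "disease_class" "" = "" ∧ c ≠ "" then E1.insert "disease_class" c else E1)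
    = pvFinalize keep n (rs ++ [(d, c)]) := by
  have hD : pvD (rs ++ [(d, c)]) = if pvD rs = "" then d else pvD rs := by
    by_cases h : pvD rs = ""
    · simp [pvD, List.find?_append, (pvD_eq_empty_iff rs).mp h]
      by_cases hd : d = "" <;> simp [hd]
    · have : rs.find? (fun r => r.1 != "") ≠ none := fun hn => h ((pvD_eq_empty_iff rs).mpr hn)
      cases hf : rs.find? (fun r => r.1 != "") with
      | none => exact absurd hf this
      | some r =>
        have hr := List.find?_some hf
        simp only [bne_iff_ne, ne_eq] at hr
        simp [pvD, List.find?_append, hf, hr]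
  have hC : pvC (rs ++ [(d, c)]) = if pvC rs = "" then c else pvC rs := by
    by_cases h : pvC rs = ""
    · simp [pvC, List.find?_append, (pvC_eq_empty_iff rs).mp h]
      by_cases hc : c = "" <;> simp [hc]
    · have : rs.find? (fun r => r.2 != "") ≠ none := fun hn => h ((pvC_eq_empty_iff rs).mpr hn)
      cases hf : rs.find? (fun r => r.2 != "") with
      | none => exact absurd hf this
      | some r =>
        have hr := List.find?_some hf
        simp only [bne_iff_ne, ne_eq] at hr
        simp [pvC, List.find?_append, hf, hr]
  cases keep with
  | false =>
    simp only [pvFinalize_shape, Bool.false_eq_true, if_false, false_and, pvP2_getD_desc, hD]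
    by_cases h : pvD rs = "" <;> by_cases hd : d = "" <;>
      simp [h, hd, pvP2_insert_desc]
  | true =>
    simp only [pvFinalize_shape, hD, hC, true_and]
    by_cases hcr : pvC rs = ""
    · -- no disease_class yet: E = pvP2 n (pvD rs)
      simp only [hcr, ne_eq, not_true_eq_false, if_false, if_true, pvP2_getD_desc, pvP2_getD_dc,
        not_false_eq_true, true_and]
      by_cases h : pvD rs = "" <;> by_cases hd : d = "" <;> by_cases hc : c = "" <;>
        simp [h, hd, hc, pvP2_insert_desc, pvP2_insert_dc, pvP2_getD_dc, pvP3_getD_dc]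
    · simp only [hcr, ne_eq, not_false_eq_true, if_true, if_neg, pvP3_getD_desc, pvP3_getD_dc, hcr]
      by_cases h : pvD rs = "" <;> by_cases hd : d = "" <;>
        simp [h, hd, hcr, pvP3_insert_desc, pvP3_getD_dc]

theorem pv_sum_set_int (l : List Int) (j : Nat) (h : j < l.length) (a : Int) :
    (l.set j a).sum = l.sum - l[j] + a := by
  rw [List.sum_set, if_pos h]
  have h2 := List.sum_take_add_sum_drop l j
  rw [List.drop_eq_getElem_cons h] at h2
  simp only [List.sum_cons] at h2
  omega

theorem pv_idxOf?_append (l : List String) (k key : String) :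
    List.idxOf? k (l ++ [key]) =
      match List.idxOf? k l with
      | some j => some j
      | none => if key = k then some l.length else none := by
  induction l with
  | nil => simp [List.idxOf?_cons, beq_iff_eq]
  | cons a t ih =>
    simp only [List.cons_append, List.idxOf?_cons, ih]
    by_cases hak : a = k
    · simp [hak]
    · simp only [beq_iff_eq, hak, if_false]
      cases h : List.idxOf? k t with
      | some j => simp
      | none => by_cases hkk : key = k <;> simp [hkk]

theorem pv_map_replace_eq_set {α : Type} (l : List (String × α)) (key : String) (w : String × α) :
    ∀ (j : Nat), (hj : j < l.length) → l[j].1 = key → (l.map (·.1)).Nodup →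
      l.map (fun p => if (p.1 == key) = true then (key, w.2) else p) = l.set j (key, w.2) := by
  induction l with
  | nil => intro j hj; simp at hj
  | cons a t ih =>
    intro j hj hk hnd
    simp only [List.map_cons, List.nodup_cons] at hnd
    cases j with
    | zero =>
      simp only [List.getElem_cons_zero] at hk
      simp only [List.map_cons, hk, beq_self_eq_true, if_pos, List.set_cons_zero]
      congr 1
      have hnk : ∀ p ∈ t, ¬ ((p.1 == key) = true) := by
        intro p hp hbe
        exact hnd.1 (by rw [hk, ← beq_iff_eq.mp hbe]; exact List.mem_map_of_mem hp)
      calc List.map (fun p => if (p.1 == key) = true then (key, w.2) else p) t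
          = List.map id t := List.map_congr_left (fun p hp => by simp [hnk p hp])
        _ = t := List.map_id t
    | succ j =>
      simp only [List.getElem_cons_succ] at hk
      have hjt : j < t.length := by simpa using hj
      have hak : ¬ ((a.1 == key) = true) := by
        intro hbe
        exact hnd.1 (by rw [beq_iff_eq.mp hbe, ← hk]; exact List.mem_map_of_mem (t.getElem_mem hjt))
      simp only [List.map_cons, hak, List.set_cons_succ]
      exact congrArg _ (ih j hjt hk hnd.2)

theorem pvD_singleton (d c : String) : pvD [(d, c)] = d := by
  by_cases hd : d = "" <;> simp [pvD, List.find?_cons, hd]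

theorem pvC_singleton (d c : String) : pvC [(d, c)] = c := by
  by_cases hc : c = "" <;> simp [pvC, List.find?_cons, hc]

-- the payload dict A builds for a fresh record
def pvPayloadA (keep : Bool) (n d cA : String) : PySem.Dict String String :=
  if keep then (if cA ≠ "" then pvP3 n d cA else pvP2 n d) else pvP2 n d

theorem pvPayloadA_getD_desc (keep : Bool) (n d cA : String) :
    (pvPayloadA keep n d cA).getD "description" "" = d := by
  cases keep <;> by_cases hc : cA = "" <;>
    simp [pvPayloadA, hc, pvP2_getD_desc, pvP3_getD_desc]

theorem pvPayloadA_getD_dc (n d cA : String) :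
    (pvPayloadA true n d cA).getD "disease_class" "" = cA := by
  by_cases hc : cA = "" <;> simp [pvPayloadA, hc, pvP2_getD_dc, pvP3_getD_dc]

theorem pvPayloadA_eq_finalize (keep : Bool) (n d cA : String) :
    pvPayloadA keep n d cA = pvFinalize keep n [(d, if keep = true then cA else "")] := by
  cases keep <;>
    simp [pvPayloadA, pvFinalize_shape, pvD_singleton, pvC_singleton]

-- A's inline payload expression, as it appears after unfolding pvStepA
theorem pvPayload_eq_finalize (keep : Bool) (n d cA : String) :
    (if keep = true then
        if cA ≠ "" then
          ((PySem.Dict.empty.insert "name" n).insert "description" d).insert "disease_class" cA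
        else (PySem.Dict.empty.insert "name" n).insert "description" d
      else (PySem.Dict.empty.insert "name" n).insert "description" d)
      = pvFinalize keep n [(d, if keep = true then cA else "")] :=
  pvPayloadA_eq_finalize keep n d cA

-- A's whole merge expression (payloadable written out as it appears after unfolding pvStepA)
theorem pvFillA_eq (keep : Bool) (n m : String) (rs : List (String × String)) (d cA : String) :
    (if keep = true ∧
        (if (pvFinalize keep n rs).getD "description" "" = "" ∧
            (if keep = true then
                if cA ≠ "" then
                  ((PySem.Dict.empty.insert "name" m).insert "description" d).insert "disease_class" cA
                else (PySem.Dict.empty.insert "name" m).insert "description" d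
              else (PySem.Dict.empty.insert "name" m).insert "description" d).getD "description" "" ≠ "" then
            (pvFinalize keep n rs).insert "description"
              ((if keep = true then
                  if cA ≠ "" then
                    ((PySem.Dict.empty.insert "name" m).insert "description" d).insert "disease_class" cA
                  else (PySem.Dict.empty.insert "name" m).insert "description" d
                else (PySem.Dict.empty.insert "name" m).insert "description" d).getD "description" "")
          else pvFinalize keep n rs).getD "disease_class" "" = "" ∧
        (if keep = true then
            if cA ≠ "" then
              ((PySem.Dict.empty.insert "name" m).insert "description" d).insert "disease_class" cA
            else (PySem.Dict.empty.insert "name" m).insert "description" d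
          else (PySem.Dict.empty.insert "name" m).insert "description" d).getD "disease_class" "" ≠ "" then
      (if (pvFinalize keep n rs).getD "description" "" = "" ∧
          (if keep = true then
              if cA ≠ "" then
                ((PySem.Dict.empty.insert "name" m).insert "description" d).insert "disease_class" cA
              else (PySem.Dict.empty.insert "name" m).insert "description" d
            else (PySem.Dict.empty.insert "name" m).insert "description" d).getD "description" "" ≠ "" then
          (pvFinalize keep n rs).insert "description"
            ((if keep = true then
                if cA ≠ "" then
                  ((PySem.Dict.empty.insert "name" m).insert "description" d).insert "disease_class" cA
                else (PySem.Dict.empty.insert "name" m).insert "description" d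
              else (PySem.Dict.empty.insert "name" m).insert "description" d).getD "description" "")
        else pvFinalize keep n rs).insert "disease_class"
        ((if keep = true then
            if cA ≠ "" then
              ((PySem.Dict.empty.insert "name" m).insert "description" d).insert "disease_class" cA
            else (PySem.Dict.empty.insert "name" m).insert "description" d
          else (PySem.Dict.empty.insert "name" m).insert "description" d).getD "disease_class" "")
    else
      (if (pvFinalize keep n rs).getD "description" "" = "" ∧
          (if keep = true then
              if cA ≠ "" then
                ((PySem.Dict.empty.insert "name" m).insert "description" d).insert "disease_class" cA
              else (PySem.Dict.empty.insert "name" m).insert "description" d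
            else (PySem.Dict.empty.insert "name" m).insert "description" d).getD "description" "" ≠ "" then
          (pvFinalize keep n rs).insert "description"
            ((if keep = true then
                if cA ≠ "" then
                  ((PySem.Dict.empty.insert "name" m).insert "description" d).insert "disease_class" cA
                else (PySem.Dict.empty.insert "name" m).insert "description" d
              else (PySem.Dict.empty.insert "name" m).insert "description" d).getD "description" "")
        else pvFinalize keep n rs))
    = pvFinalize keep n (rs ++ [(d, if keep = true then cA else "")]) := by
  have hpay : (if keep = true then
      if cA ≠ "" then
        ((PySem.Dict.empty.insert "name" m).insert "description" d).insert "disease_class" cA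
      else (PySem.Dict.empty.insert "name" m).insert "description" d
    else (PySem.Dict.empty.insert "name" m).insert "description" d) = pvPayloadA keep m d cA := rfl
  rw [hpay, pvPayloadA_getD_desc]
  cases keep with
  | false =>
    simpa using pvFill_eq false n rs d ""
  | true =>
    rw [pvPayloadA_getD_dc]
    simpa using pvFill_eq true n rs d cA

-- the simulation invariant between B's pass-1 state and A's loop state
def pvInv (keep : Bool)
    (sb : PySem.Dict String (String × List (String × String)) × Int)
    (sa : List (PySem.Dict String String) × PySem.Dict String Int × Int × Int) : Prop :=
  sa.1 = sb.1.items.map (fun p => pvFinalize keep p.2.1 p.2.2) ∧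
  (∀ k, sa.2.1.get? k = (List.idxOf? k (sb.1.items.map (·.1))).map (fun n => (n : Int))) ∧
  sa.2.2.1 = sb.2 ∧
  sa.2.2.2 = (sb.1.items.map (fun p => (p.2.2.length : Int) - 1)).sum ∧
  sb.1.keys.Nodup

set_option maxHeartbeats 1000000 in
theorem pvInv_step (keep : Bool) (sb : PySem.Dict String (String × List (String × String)) × Int)
    (sa : List (PySem.Dict String String) × PySem.Dict String Int × Int × Int)
    (item : List (String × String))
    (h : pvInv keep sb sa) : pvInv keep (pvStepB keep sb item) (pvStepA keep sa item) := by
  obtain ⟨groups, dropped⟩ := sb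
  obtain ⟨cleaned, seen, droppedA, dups⟩ := sa
  obtain ⟨h1, h2, h3, h4, h5⟩ := h
  simp only at h1 h2 h3 h4 h5
  simp only [PySem.Dict.keys] at h5
  by_cases hn : pvNorm (pvGet item "name") = ""
  · exact ⟨by simp [pvStepA, pvStepB, hn, h1], by simp [pvStepA, pvStepB, hn, h2],
      by simp [pvStepA, pvStepB, hn, h3], by simp [pvStepA, pvStepB, hn, h4],
      by simpa [pvStepB, hn, PySem.Dict.keys] using h5⟩
  · have hcontains : seen.contains (pvNormKey (pvNorm (pvGet item "name"))) =
        groups.contains (pvNormKey (pvNorm (pvGet item "name"))) := by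
      rw [PySem.Dict.contains_eq_isSome_get?, h2]
      cases hj : List.idxOf? (pvNormKey (pvNorm (pvGet item "name"))) (groups.items.map (·.1)) with
      | none =>
        have hm := List.idxOf?_eq_none_iff.mp hj
        have hg : groups.contains (pvNormKey (pvNorm (pvGet item "name"))) = false := by
          rw [← Bool.not_eq_true, PySem.Dict.contains_iff_mem_keys]
          simpa [PySem.Dict.keys] using hm
        simp [hg]
      | some j =>
        obtain ⟨hlt, hel, -⟩ := List.idxOf?_eq_some_iff.mp hj
        have hg : groups.contains (pvNormKey (pvNorm (pvGet item "name"))) = true := by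
          rw [PySem.Dict.contains_iff_mem_keys]
          simp only [PySem.Dict.keys]
          exact hel ▸ List.getElem_mem hlt
        simp [hg]
    by_cases hk : groups.contains (pvNormKey (pvNorm (pvGet item "name"))) = true
    · -- duplicate key: A back-patches cleaned[seen[key]], B appends to the group
      have hst : seen.contains (pvNormKey (pvNorm (pvGet item "name"))) = true :=
        hcontains.trans hk
      obtain ⟨j, hj⟩ : ∃ j, List.idxOf? (pvNormKey (pvNorm (pvGet item "name")))
          (groups.items.map (·.1)) = some j := by
        cases hj : List.idxOf? (pvNormKey (pvNorm (pvGet item "name"))) (groups.items.map (·.1)) with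
        | none =>
          rw [PySem.Dict.contains_iff_mem_keys] at hk
          exact absurd (by simpa [PySem.Dict.keys] using hk) (List.idxOf?_eq_none_iff.mp hj).elim
        | some j => exact ⟨j, rfl⟩
      obtain ⟨hjlt, hjel, -⟩ := List.idxOf?_eq_some_iff.mp hj
      have hjlen : j < groups.items.length := by simpa using hjlt
      have hfst : (groups.items[j]).1 = pvNormKey (pvNorm (pvGet item "name")) := by
        simpa using hjel
      have hpair : groups.items[j] = (pvNormKey (pvNorm (pvGet item "name")), groups.items[j].2) := by
        exact Prod.ext hfst rfl
      have hmemj : (pvNormKey (pvNorm (pvGet item "name")), groups.items[j].2) ∈ groups.items :=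
        hpair ▸ List.getElem_mem hjlen
      have hnd : groups.keys.Nodup := by simpa only [PySem.Dict.keys] using h5
      have hgetD : groups.getD (pvNormKey (pvNorm (pvGet item "name"))) ("", []) = groups.items[j].2 :=
        PySem.Dict.getD_of_mem_items groups hmemj hnd _
      have hget? : seen.get? (pvNormKey (pvNorm (pvGet item "name"))) = some (j : Int) := by
        rw [h2, hj]; rfl
      have hgetDseen : seen.getD (pvNormKey (pvNorm (pvGet item "name"))) 0 = (j : Int) := by
        rw [PySem.Dict.getD_eq_get?_getD, hget?]; rfl
      have hmod : groups.modify (pvNormKey (pvNorm (pvGet item "name"))) ("", [])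
          (fun g => (g.1, g.2 ++ [(pvNorm (pvGet item "description"),
            if keep = true then pvNorm (pvGet item "disease_class") else "")]))
          = groups.insert (pvNormKey (pvNorm (pvGet item "name")))
            (groups.items[j].2.1, groups.items[j].2.2 ++ [(pvNorm (pvGet item "description"),
              if keep = true then pvNorm (pvGet item "disease_class") else "")]) := by
        simp [PySem.Dict.modify, hgetD]
      have hitems : (groups.insert (pvNormKey (pvNorm (pvGet item "name")))
            (groups.items[j].2.1, groups.items[j].2.2 ++ [(pvNorm (pvGet item "description"),
              if keep = true then pvNorm (pvGet item "disease_class") else "")])).items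
          = groups.items.set j (pvNormKey (pvNorm (pvGet item "name")),
            (groups.items[j].2.1, groups.items[j].2.2 ++ [(pvNorm (pvGet item "description"),
              if keep = true then pvNorm (pvGet item "disease_class") else "")])) := by
        rw [PySem.Dict.items_insert_of_contains groups _ hk]
        exact pv_map_replace_eq_set groups.items (pvNormKey (pvNorm (pvGet item "name")))
          (pvNormKey (pvNorm (pvGet item "name")),
            (groups.items[j].2.1, groups.items[j].2.2 ++ [(pvNorm (pvGet item "description"),
              if keep = true then pvNorm (pvGet item "disease_class") else "")]))
          j hjlen hfst h5
      have hexist : cleaned.getD ((j : Int)).toNat PySem.Dict.empty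
          = pvFinalize keep (groups.items[j]).2.1 (groups.items[j]).2.2 := by
        rw [h1, Int.toNat_natCast, List.getD_eq_getElem?_getD,
          List.getElem?_eq_getElem (by simpa using hjlen)]
        simp
      have hfst2 : (groups.items.set j (pvNormKey (pvNorm (pvGet item "name")),
            (groups.items[j].2.1, groups.items[j].2.2 ++ [(pvNorm (pvGet item "description"),
              if keep = true then pvNorm (pvGet item "disease_class") else "")]))).map (·.1)
          = groups.items.map (·.1) := by
        rw [List.map_set, ← hjel]
        exact List.set_getElem_self (by simpa using hjlt)
      simp only [pvStepA, pvStepB, hn, hst, hk, if_true, if_false]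
      refine ⟨?_, ?_, ?_, ?_, ?_⟩ <;> dsimp only
      · rw [hmod, hitems, hgetDseen, hexist, List.map_set, pvFillA_eq, h1]
        dsimp only
        rw [Int.toNat_natCast]
      · intro k
        rw [hmod, hitems, hfst2]
        exact h2 k
      · exact h3
      · rw [hmod, hitems, List.map_set]
        rw [pv_sum_set_int _ j (by simpa using hjlen)]
        rw [h4]
        have hval : (groups.items.map (fun p => ((p.2.2.length : Int) - 1)))[j]'(by simpa using hjlen)
            = ((groups.items[j].2.2.length : Int) - 1) := by
          simp
        rw [hval]
        dsimp only
        rw [List.length_append]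
        simp only [List.length_cons, List.length_nil]
        push_cast
        ring
      · rw [hmod]
        simp only [PySem.Dict.keys, hitems, hfst2]
        exact h5
    · -- fresh key: both append
      have hkf : groups.contains (pvNormKey (pvNorm (pvGet item "name"))) = false :=
        Bool.not_eq_true _ ▸ hk
      have hsf : seen.contains (pvNormKey (pvNorm (pvGet item "name"))) = false :=
        hcontains.trans hkf
      have hnmem : pvNormKey (pvNorm (pvGet item "name")) ∉ groups.items.map (·.1) := by
        intro hm
        rw [← Bool.not_eq_true, PySem.Dict.contains_iff_mem_keys] at hkf
        exact hkf (by simpa [PySem.Dict.keys] using hm)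
      have hitems := PySem.Dict.items_insert_of_not_contains groups
        ((pvNorm (pvGet item "name"),
          [(pvNorm (pvGet item "description"),
            if keep = true then pvNorm (pvGet item "disease_class") else "")])) hkf
      simp only [pvStepA, pvStepB, hn, hsf, hkf, Bool.false_eq_true, if_false]
      refine ⟨?_, ?_, ?_, ?_, ?_⟩ <;> dsimp only
      · rw [hitems, List.map_append, h1, List.map_cons, List.map_nil, pvPayload_eq_finalize]
      · intro k
        rw [PySem.Dict.get?_insert]
        simp only [hitems, List.map_append, List.map_cons, List.map_nil]
        rw [pv_idxOf?_append]
        by_cases hkk : k = pvNormKey (pvNorm (pvGet item "name"))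
        · subst hkk
          rw [List.idxOf?_eq_none_iff.mpr hnmem, if_pos rfl]
          simp [h1]
        · rw [if_neg hkk]
          cases hik : List.idxOf? k (groups.items.map (·.1)) with
          | none => simp [h2 k, hik, Ne.symm hkk]
          | some j => simp [h2 k, hik]
      · exact h3
      · simp only [hitems, List.map_append, List.sum_append, List.map_cons, List.map_nil, h4]
        simp
      · simp only [PySem.Dict.keys, hitems, List.map_append, List.map_cons, List.map_nil]
        rw [List.nodup_append]
        refine ⟨h5, List.nodup_singleton _, ?_⟩
        intro a ha b hb
        rw [List.mem_singleton] at hb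
        subst hb
        exact fun heq => hnmem (heq ▸ ha)

theorem pvInv_foldl' (keep : Bool) (items : List (List (String × String))) :
    ∀ sb sa, pvInv keep sb sa →
      pvInv keep (items.foldl (pvStepB keep) sb) (items.foldl (pvStepA keep) sa) := by
  induction items with
  | nil => exact fun _ _ h => h
  | cons it t ih =>
    intro sb sa h
    rw [List.foldl_cons, List.foldl_cons]
    exact ih _ _ (pvInv_step keep sb sa it h)

theorem pvInv_foldl (keep : Bool) (items : List (List (String × String))) :
    pvInv keep (items.foldl (pvStepB keep) (PySem.Dict.empty, 0))
      (items.foldl (pvStepA keep) ([], PySem.Dict.empty, 0, 0)) := by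
  refine pvInv_foldl' keep items _ _ ?_
  refine ⟨by simp [PySem.Dict.empty], fun k => by simp [PySem.Dict.empty, PySem.Dict.get?],
    rfl, by simp [PySem.Dict.empty], by simp [PySem.Dict.empty, PySem.Dict.keys]⟩

theorem pvStepB2_foldl (keep : Bool) (l : List (String × List (String × String))) (acc) :
    l.foldl (pvStepB2 keep) acc =
      (acc.1 ++ l.map (fun g => (pvFinalize keep g.1 g.2).items),
       acc.2 + (l.map (fun g => (g.2.length : Int) - 1)).sum) := by
  induction l generalizing acc with
  | nil => simp
  | cons g t ih => simp [List.foldl_cons, ih, pvStepB2, Prod.ext_iff]; ring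

-- ===== VERDICT (by name: the statement is the Claim_ definition above) =====
theorem clean_named_entities_spec : Claim_equal_clean_named_entities := by
  intro items keep _
  unfold Spec_clean_named_entities clean_named_entities clean_named_entities_alt
  have h := pvInv_foldl keep items
  obtain ⟨h1, h2, h3, h4, h5⟩ := h
  simp only [pvStepB2_foldl, PySem.Dict.values, h1, h3, h4, List.map_map, List.nil_append,
    zero_add]
  rfl
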